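-- pv_equiv track=rewrite | github.com/woshiqingteng/embedded | code/acm_exam/solution/math/multiple_of_three/multiple_of_three_1.py | multiple_of_three
-- ===== SOURCE A (Python) =====
-- def multiple_of_three(s):
--     digit = [int(c) for c in s]
--     remainder = sum(digit) % 3
--     count = [digit.count(i) for i in range(10)]
--
--     def remove_one(count, candidates):
--         for digit in candidates:
--             if count[digit] > 0:
--                 count[digit] -= 1
--                 return True
--         return False
--
--     def remove_two(count, candidates):
--         removed = 0
--         for digit in candidates:
--             while count[digit] > 0 and removed < 2:
--                 count[digit] -= 1
--                 removed += 1
--             if removed == 2: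
--                 return True
--         return False
--
--     if remainder == 1:
--         if not remove_one(count, [1, 4, 7]):
--             if not remove_two(count, [2, 5, 8]):
--                 return "-1"
--     elif remainder == 2:
--         if not remove_one(count, [2, 5, 8]):
--             if not remove_two(count, [1, 4, 7]):
--                 return "-1"
--
--     result = "".join([str(i) * count[i] for i in range(9, -1, -1)])
--
--     if not result:
--         return "-1"
--     elif result[0] == "0":
--         return "0"
--
--     return result
-- ===== SOURCE B (Python) =====
-- def _drop_first(digits, r):
--     # digits ascending; remove the first (smallest) digit with residue r, or None
--     for i, d in enumerate(digits):
--         if d % 3 == r: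
--             return digits[:i] + digits[i + 1:]
--     return None
--
--
-- def multiple_of_three(s):
--     digits = sorted(int(c) for c in s)
--     r = sum(digits) % 3
--     if r == 0:
--         kept = digits
--     else:
--         kept = _drop_first(digits, r)
--         if kept is None:
--             two = _drop_first(digits, 3 - r)
--             kept = _drop_first(two, 3 - r) if two is not None else None
--             if kept is None:
--                 return "-1"
--     res = "".join(str(d) for d in reversed(kept))
--     if not res:
--         return "-1"
--     if res[0] == "0":
--         return "0"
--     return res
-- ===== Notes on version B (the rewrite author's own statement) =====
-- stated objective: simpler
-- what changed: B replaces A's 10-entry digit-frequency table with indexed decrements and while-loops by sorting the digit list once, deleting the first one (or two) sorted elements of the needed residue class, and joining the list in reverse; the count array and both removal helpers disappear.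
import Mathlib
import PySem

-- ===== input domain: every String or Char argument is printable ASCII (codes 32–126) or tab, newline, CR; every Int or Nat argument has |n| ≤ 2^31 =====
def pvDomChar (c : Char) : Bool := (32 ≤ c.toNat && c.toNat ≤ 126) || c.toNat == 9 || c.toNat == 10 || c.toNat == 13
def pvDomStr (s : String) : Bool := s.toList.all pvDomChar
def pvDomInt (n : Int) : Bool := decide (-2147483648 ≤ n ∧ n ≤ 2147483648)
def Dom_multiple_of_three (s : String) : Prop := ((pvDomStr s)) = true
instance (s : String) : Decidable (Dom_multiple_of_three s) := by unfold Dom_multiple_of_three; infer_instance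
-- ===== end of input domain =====

-- B replaces A's digit-frequency table, indexed decrements and while-loops by one ascending
-- sort followed by removal of the first matching element(s) of the sorted list (objective: simpler).

-- ===== PORT A =====
-- helper remove_one(count, candidates)
def pvA_removeOne (count : List Int) (cands : List Nat) : Bool × List Int :=
  match cands with
  | [] => (false, count)
  | d :: rest =>
    if count.getD d 0 > 0 then (true, count.set d (count.getD d 0 - 1))
    else pvA_removeOne count rest

-- the inner 'while count[digit] > 0 and removed < 2' loop of remove_two
def pvA_whileRemove (count : List Int) (d : Nat) (removed : Int) : List Int × Int :=
  if count.getD d 0 > 0 ∧ removed < 2 then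
    pvA_whileRemove (count.set d (count.getD d 0 - 1)) d (removed + 1)
  else (count, removed)
termination_by (2 - removed).toNat
decreasing_by omega

-- helper remove_two(count, candidates)
def pvA_removeTwo (count : List Int) (removed : Int) (cands : List Nat) : Bool × List Int :=
  match cands with
  | [] => (false, count)
  | d :: rest =>
    let p := pvA_whileRemove count d removed
    if p.2 = 2 then (true, p.1) else pvA_removeTwo p.1 p.2 rest

def multiple_of_three (s : String) : String :=
  let digit : List Int := s.toList.map (fun c => (PySem.Int.ofChars? [c]).getD 0)
  -- int(c); Pre_ guarantees each char is a digit so ofChars? is some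
  let remainder := PySem.Int.mod digit.sum 3
  let count : List Int := (List.range 10).map (fun i => ((PySem.List.count digit (i : Int) : Nat) : Int))
  let count? : Option (List Int) :=
    if remainder = 1 then
      let r1 := pvA_removeOne count [1, 4, 7]
      if r1.1 then some r1.2
      else
        let r2 := pvA_removeTwo r1.2 0 [2, 5, 8]
        if r2.1 then some r2.2 else none
    else if remainder = 2 then
      let r1 := pvA_removeOne count [2, 5, 8]
      if r1.1 then some r1.2
      else
        let r2 := pvA_removeTwo r1.2 0 [1, 4, 7]
        if r2.1 then some r2.2 else none
    else some count
  match count? with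
  | none => "-1"
  | some c =>
    let result : List Char :=
      PySem.Chars.join [] ((PySem.List.pyRange 9 (-1) (-1)).map
        (fun i => PySem.List.pyRepeat (PySem.Int.toChars i) (c.getD i.toNat 0)))
    if result = [] then "-1"
    else if PySem.List.pyGet? result 0 = some '0' then "0"
    else String.ofList result

-- ===== PORT B =====
-- helper _drop_first(digits, r): remove the first digit with residue r, None if absent
def pvB_dropFirst (l : List Int) (r : Int) : Option (List Int) :=
  match l with
  | [] => none
  | d :: t =>
    if PySem.Int.mod d 3 = r then some t
    else (pvB_dropFirst t r).map (fun t' => d :: t')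

def multiple_of_three_alt (s : String) : String :=
  let digits : List Int :=
    PySem.List.sorted (s.toList.map (fun c => (PySem.Int.ofChars? [c]).getD 0)) (fun x => x) false
  let r := PySem.Int.mod digits.sum 3
  let kept? : Option (List Int) :=
    if r = 0 then some digits
    else
      match pvB_dropFirst digits r with
      | some k => some k
      | none =>
        match pvB_dropFirst digits (3 - r) with
        | some two => pvB_dropFirst two (3 - r)
        | none => none
  match kept? with
  | none => "-1"
  | some kept =>
    let res : List Char := PySem.Chars.join [] (kept.reverse.map PySem.Int.toChars)
    if res = [] then "-1"
    else if PySem.List.pyGet? res 0 = some '0' then "0"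
    else String.ofList res

-- ===== PRECONDITION & SPEC =====
-- Pre_: every character is an ASCII digit — on any other string Python's int(c) raises ValueError in A (and in B).
def Pre_multiple_of_three (s : String) : Prop :=
  (s.toList.all (fun c => 48 ≤ c.toNat && c.toNat ≤ 57)) = true
instance (s : String) : Decidable (Pre_multiple_of_three s) := by unfold Pre_multiple_of_three; infer_instance
def pvWitness_multiple_of_three : String := "1023"

def Spec_multiple_of_three (s : String) (out : String) : Prop := out = multiple_of_three_alt s
instance (s : String) (out : String) : Decidable (Spec_multiple_of_three s out) := by unfold Spec_multiple_of_three; infer_instance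

-- ===== CLAIM (what is proved, stated in full; the proofs are below) =====
def Claim_equal_multiple_of_three : Prop := ∀ (s : String), Dom_multiple_of_three s → Pre_multiple_of_three s → Spec_multiple_of_three s (multiple_of_three s)

-- ===== LEMMAS AND PROOFS =====

theorem digit_mem (c : Char) (ha : 48 ≤ c.toNat) (hb : c.toNat ≤ 57) :
    c ∈ ['0','1','2','3','4','5','6','7','8','9'] := by
  have h2 : c = Char.ofNat c.toNat := (Char.ofNat_toNat c).symm
  set n := c.toNat with hn
  interval_cases n <;> rw [h2] <;> decide

theorem mem_digits (s : String) (hpre : Pre_multiple_of_three s) :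
    ∀ d ∈ s.toList.map (fun c => (PySem.Int.ofChars? [c]).getD 0),
      d ∈ ([0,1,2,3,4,5,6,7,8,9] : List Int) := by
  intro d hd
  simp only [List.mem_map] at hd
  obtain ⟨c, hc, rfl⟩ := hd
  unfold Pre_multiple_of_three at hpre
  rw [List.all_eq_true] at hpre
  have hb := hpre c hc
  simp only [Bool.and_eq_true, decide_eq_true_eq] at hb
  have := digit_mem c hb.1 hb.2
  fin_cases this <;> decide

-- the sorted digit list, block by block
def flatD (n0 n1 n2 n3 n4 n5 n6 n7 n8 n9 : Nat) : List Int :=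
  List.replicate n0 0 ++ (List.replicate n1 1 ++ (List.replicate n2 2 ++ (List.replicate n3 3 ++
  (List.replicate n4 4 ++ (List.replicate n5 5 ++ (List.replicate n6 6 ++ (List.replicate n7 7 ++
  (List.replicate n8 8 ++ List.replicate n9 9))))))))

theorem pairwise_rep_append (a : Int) (n : Nat) (t : List Int)
    (ht : t.Pairwise (· ≤ ·)) (hb : ∀ x ∈ t, a ≤ x) :
    (List.replicate n a ++ t).Pairwise (· ≤ ·) := by
  apply List.pairwise_append.2
  exact ⟨List.pairwise_replicate.2 (Or.inr (le_refl a)), ht,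
    fun x hx y hy => by rw [(List.mem_replicate.1 hx).2]; exact hb y hy⟩

theorem sorted_flat (ds : List Int) (hds : ∀ d ∈ ds, d ∈ ([0,1,2,3,4,5,6,7,8,9] : List Int)) :
    PySem.List.sorted ds (fun x => x) false =
      flatD (ds.count 0) (ds.count 1) (ds.count 2) (ds.count 3) (ds.count 4)
            (ds.count 5) (ds.count 6) (ds.count 7) (ds.count 8) (ds.count 9) := by
  apply PySem.List.sorted_id_eq_of_perm_of_pairwise
  · rw [List.perm_iff_count]
    intro a
    by_cases hmem : a ∈ ([0,1,2,3,4,5,6,7,8,9] : List Int)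
    · fin_cases hmem <;> simp [flatD, List.count_append, List.count_replicate]
    · have h0 : ds.count a = 0 := List.count_eq_zero.2 (fun h => hmem (hds a h))
      rw [h0]
      apply List.count_eq_zero.2
      intro hin
      apply hmem
      simp only [flatD, List.mem_append, List.mem_replicate] at hin
      rcases hin with ⟨_,rfl⟩|⟨_,rfl⟩|⟨_,rfl⟩|⟨_,rfl⟩|⟨_,rfl⟩|⟨_,rfl⟩|⟨_,rfl⟩|⟨_,rfl⟩|⟨_,rfl⟩|⟨_,rfl⟩ <;> decide
  · unfold flatD
    apply pairwise_rep_append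
    apply pairwise_rep_append
    apply pairwise_rep_append
    apply pairwise_rep_append
    apply pairwise_rep_append
    apply pairwise_rep_append
    apply pairwise_rep_append
    apply pairwise_rep_append
    apply pairwise_rep_append
    · exact List.pairwise_replicate.2 (Or.inr (le_refl _))
    all_goals (intro x hx; simp [List.mem_append, List.mem_replicate] at hx; omega)

theorem count_list (ds : List Int) :
    (List.range 10).map (fun i => ((PySem.List.count ds (i : Int) : Nat) : Int)) =
      [(ds.count 0 : Int), ds.count 1, ds.count 2, ds.count 3, ds.count 4,
       ds.count 5, ds.count 6, ds.count 7, ds.count 8, ds.count 9] := by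
  simp [show List.range 10 = [0,1,2,3,4,5,6,7,8,9] from rfl, PySem.List.count]

theorem join_nil_flatten (l : List (List Char)) : PySem.Chars.join [] l = l.flatten := by
  induction l with
  | nil => rfl
  | cons a t ih =>
    cases t with
    | nil => simp [PySem.Chars.join_singleton]
    | cons b u =>
      rw [PySem.Chars.join_cons_cons]
      simp at ih ⊢
      rw [ih]

theorem render_eq (m0 m1 m2 m3 m4 m5 m6 m7 m8 m9 : Nat) :
    PySem.Chars.join [] ((PySem.List.pyRange 9 (-1) (-1)).map
      (fun i => PySem.List.pyRepeat (PySem.Int.toChars i)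
        (([(m0 : Int), m1, m2, m3, m4, m5, m6, m7, m8, m9] : List Int).getD i.toNat 0))) =
    PySem.Chars.join [] ((flatD m0 m1 m2 m3 m4 m5 m6 m7 m8 m9).reverse.map PySem.Int.toChars) := by
  rw [show PySem.List.pyRange 9 (-1) (-1) = [9,8,7,6,5,4,3,2,1,0] from by decide]
  rw [join_nil_flatten, join_nil_flatten]
  simp only [List.map_cons, List.map_nil, flatD, List.reverse_append, List.reverse_replicate,
    List.map_append, List.map_replicate, List.flatten_append, List.flatten_cons, List.flatten_nil]
  norm_num [List.getD, PySem.List.pyRepeat_singleton,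
    show PySem.Int.toChars 0 = ['0'] from rfl, show PySem.Int.toChars 1 = ['1'] from rfl,
    show PySem.Int.toChars 2 = ['2'] from rfl, show PySem.Int.toChars 3 = ['3'] from rfl,
    show PySem.Int.toChars 4 = ['4'] from rfl, show PySem.Int.toChars 5 = ['5'] from rfl,
    show PySem.Int.toChars 6 = ['6'] from rfl, show PySem.Int.toChars 7 = ['7'] from rfl,
    show PySem.Int.toChars 8 = ['8'] from rfl, show PySem.Int.toChars 9 = ['9'] from rfl,
    List.flatten_replicate_singleton,
    show (9:Int).toNat = 9 from rfl, show (8:Int).toNat = 8 from rfl,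
    show (7:Int).toNat = 7 from rfl, show (6:Int).toNat = 6 from rfl,
    show (5:Int).toNat = 5 from rfl, show (4:Int).toNat = 4 from rfl,
    show (3:Int).toNat = 3 from rfl, show (2:Int).toNat = 2 from rfl,
    List.getElem_cons_succ, List.getElem_cons_zero]

theorem drop_rep (i r : Int) (n : Nat) :
    pvB_dropFirst (List.replicate n i) r =
      if 0 < n ∧ PySem.Int.mod i 3 = r then some (List.replicate (n-1) i) else none := by
  induction n with
  | zero => simp [pvB_dropFirst]
  | succ k ih =>
    rw [List.replicate_succ, pvB_dropFirst]
    by_cases h : i % 3 = r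
    · simp [h]
    · simp [h, ih]

theorem drop_append_some {xs xs' : List Int} {r : Int} (ys : List Int)
    (h : pvB_dropFirst xs r = some xs') :
    pvB_dropFirst (xs ++ ys) r = some (xs' ++ ys) := by
  induction xs generalizing xs' with
  | nil => simp [pvB_dropFirst] at h
  | cons d t ih =>
    rw [pvB_dropFirst] at h
    rw [List.cons_append, pvB_dropFirst]
    by_cases hd : d % 3 = r
    · simp [hd] at h ⊢; simp [← h]
    · simp [hd] at h ⊢
      obtain ⟨t', ht', rfl⟩ := h
      exact ⟨t' ++ ys, ih ht', by simp⟩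

theorem drop_append_none {xs : List Int} {r : Int} (ys : List Int)
    (h : pvB_dropFirst xs r = none) :
    pvB_dropFirst (xs ++ ys) r = (pvB_dropFirst ys r).map (fun t => xs ++ t) := by
  induction xs with
  | nil => simp
  | cons d t ih =>
    rw [pvB_dropFirst] at h
    rw [List.cons_append, pvB_dropFirst]
    by_cases hd : d % 3 = r
    · simp [hd] at h
    · simp [hd] at h ⊢
      rw [ih h]
      cases pvB_dropFirst ys r <;> simp

theorem while_zero (count : List Int) (d : Nat) (removed : Int) (h : count.getD d 0 = 0) :
    pvA_whileRemove count d removed = (count, removed) := by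
  simp only [List.getD] at h
  rw [pvA_whileRemove]
  simp [List.getD, h]

theorem while_succ (count : List Int) (d : Nat) (removed : Int)
    (h : 0 < count.getD d 0) (h2 : removed < 2) :
    pvA_whileRemove count d removed =
      pvA_whileRemove (count.set d (count.getD d 0 - 1)) d (removed + 1) := by
  simp only [List.getD] at h ⊢
  rw [pvA_whileRemove]
  simp [List.getD, h, h2]

theorem while_stop (count : List Int) (d : Nat) :
    pvA_whileRemove count d 2 = (count, 2) := by
  rw [pvA_whileRemove]
  simp


theorem dropFlat1 (n0 n1 n2 n3 n4 n5 n6 n7 n8 n9 : Nat) :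
    pvB_dropFirst (flatD n0 n1 n2 n3 n4 n5 n6 n7 n8 n9) 1 =
      if 0 < n1 then some (flatD n0 (n1-1) n2 n3 n4 n5 n6 n7 n8 n9)
      else if 0 < n4 then some (flatD n0 n1 n2 n3 (n4-1) n5 n6 n7 n8 n9)
      else if 0 < n7 then some (flatD n0 n1 n2 n3 n4 n5 n6 (n7-1) n8 n9)
      else none := by
  unfold flatD
  rw [drop_append_none _ (by simp [drop_rep])]
  by_cases h1 : 0 < n1
  · rw [drop_append_some _ (by simp [drop_rep, h1]; rfl)]
    simp [h1]
  · rw [drop_append_none _ (by simp [drop_rep, h1])]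
    rw [drop_append_none _ (by simp [drop_rep])]
    rw [drop_append_none _ (by simp [drop_rep])]
    by_cases h4 : 0 < n4
    · rw [drop_append_some _ (by simp [drop_rep, h4]; rfl)]
      simp [h1, h4]
    · rw [drop_append_none _ (by simp [drop_rep, h4])]
      rw [drop_append_none _ (by simp [drop_rep])]
      rw [drop_append_none _ (by simp [drop_rep])]
      by_cases h7 : 0 < n7
      · rw [drop_append_some _ (by simp [drop_rep, h7]; rfl)]
        simp [h1, h4, h7]
      · rw [drop_append_none _ (by simp [drop_rep, h7])]
        rw [drop_append_none _ (by simp [drop_rep])]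
        simp [drop_rep, h1, h4, h7]

theorem getD_set_self (l : List Int) (i : Nat) (a : Int) (h : i < l.length) :
    (l.set i a).getD i 0 = a := by
  rw [List.getD_eq_getElem?_getD, List.getElem?_set_self (by omega)]
  rfl

theorem set_getD_self (l : List Int) (i : Nat) (h : i < l.length) :
    l.set i (l.getD i 0) = l := by
  rw [List.getD_eq_getElem?_getD, List.getElem?_eq_getElem h]
  simp [List.set_getElem_self]

theorem while_spec0 (count : List Int) (d : Nat) (hd : d < count.length)
    (hnn : 0 ≤ count.getD d 0) :
    pvA_whileRemove count d 0 =
      if 2 ≤ count.getD d 0 then (count.set d (count.getD d 0 - 2), 2)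
      else (count.set d 0, count.getD d 0) := by
  by_cases h2 : 2 ≤ count.getD d 0
  · rw [while_succ _ _ _ (by omega) (by norm_num)]
    rw [while_succ _ _ _ (by rw [getD_set_self _ _ _ hd]; omega) (by norm_num)]
    simp only [show (0:Int)+1+1 = 2 by norm_num]
    rw [while_stop, getD_set_self _ _ _ hd, List.set_set, if_pos h2]
    have : count.getD d 0 - 1 - 1 = count.getD d 0 - 2 := by ring
    rw [this]
  · by_cases h1 : count.getD d 0 = 1
    · rw [while_succ _ _ _ (by omega) (by norm_num)]
      rw [while_zero _ _ _ (by rw [getD_set_self _ _ _ hd]; omega)]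
      rw [if_neg h2, h1]
      norm_num
    · have h0 : count.getD d 0 = 0 := by omega
      have hset : count.set d 0 = count := by rw [← h0]; exact set_getD_self _ _ hd
      rw [while_zero _ _ _ h0, if_neg h2, hset, h0]

theorem while_spec1 (count : List Int) (d : Nat)
    (hnn : 0 ≤ count.getD d 0) :
    pvA_whileRemove count d 1 =
      if 1 ≤ count.getD d 0 then (count.set d (count.getD d 0 - 1), 2) else (count, 1) := by
  by_cases h1 : 1 ≤ count.getD d 0
  · rw [while_succ _ _ _ (by omega) (by norm_num)]
    simp only [show (1:Int)+1 = 2 by norm_num]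
    rw [while_stop, if_pos h1]
  · rw [while_zero _ _ _ (by omega), if_neg h1]

theorem dropFlat2 (n0 n1 n2 n3 n4 n5 n6 n7 n8 n9 : Nat) :
    pvB_dropFirst (flatD n0 n1 n2 n3 n4 n5 n6 n7 n8 n9) 2 =
      if 0 < n2 then some (flatD n0 n1 (n2-1) n3 n4 n5 n6 n7 n8 n9)
      else if 0 < n5 then some (flatD n0 n1 n2 n3 n4 (n5-1) n6 n7 n8 n9)
      else if 0 < n8 then some (flatD n0 n1 n2 n3 n4 n5 n6 n7 (n8-1) n9)
      else none := by
  unfold flatD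
  rw [drop_append_none _ (by simp [drop_rep])]
  rw [drop_append_none _ (by simp [drop_rep])]
  by_cases h2 : 0 < n2
  · rw [drop_append_some _ (by simp [drop_rep, h2]; rfl)]
    simp [h2]
  · rw [drop_append_none _ (by simp [drop_rep, h2])]
    rw [drop_append_none _ (by simp [drop_rep])]
    rw [drop_append_none _ (by simp [drop_rep])]
    by_cases h5 : 0 < n5
    · rw [drop_append_some _ (by simp [drop_rep, h5]; rfl)]
      simp [h2, h5]
    · rw [drop_append_none _ (by simp [drop_rep, h5])]
      rw [drop_append_none _ (by simp [drop_rep])]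
      rw [drop_append_none _ (by simp [drop_rep])]
      by_cases h8 : 0 < n8
      · rw [drop_append_some _ (by simp [drop_rep, h8]; rfl)]
        simp [h2, h5, h8]
      · rw [drop_append_none _ (by simp [drop_rep, h8])]
        simp [drop_rep, h2, h5, h8]

theorem remOne_spec (count : List Int) (d1 d2 d3 : Nat) :
    pvA_removeOne count [d1, d2, d3] =
      if count.getD d1 0 > 0 then (true, count.set d1 (count.getD d1 0 - 1))
      else if count.getD d2 0 > 0 then (true, count.set d2 (count.getD d2 0 - 1))
      else if count.getD d3 0 > 0 then (true, count.set d3 (count.getD d3 0 - 1))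
      else (false, count) := by
  simp only [pvA_removeOne]

theorem getD_set_ne (l : List Int) (i j : Nat) (a : Int) (h : i ≠ j) :
    (l.set i a).getD j 0 = l.getD j 0 := by
  rw [List.getD_eq_getElem?_getD, List.getElem?_set_ne h, ← List.getD_eq_getElem?_getD]

theorem remTwo_cons (count : List Int) (removed : Int) (d : Nat) (rest : List Nat) :
    pvA_removeTwo count removed (d :: rest) =
      (if (pvA_whileRemove count d removed).2 = 2 then (true, (pvA_whileRemove count d removed).1)
       else pvA_removeTwo (pvA_whileRemove count d removed).1 (pvA_whileRemove count d removed).2 rest) := rfl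

theorem remTwo_nil (count : List Int) (removed : Int) : pvA_removeTwo count removed [] = (false, count) := rfl

theorem set_zero_noop (l : List Int) (i : Nat) (hl : i < l.length) (h : l.getD i 0 = 0) :
    l.set i 0 = l := by
  rw [← h]
  exact set_getD_self _ _ hl

theorem remTwo_spec (count : List Int) (d1 d2 d3 : Nat)
    (hl1 : d1 < count.length) (hl2 : d2 < count.length) (hl3 : d3 < count.length)
    (h12 : d1 ≠ d2) (h13 : d1 ≠ d3) (h23 : d2 ≠ d3)
    (nn1 : 0 ≤ count.getD d1 0) (nn2 : 0 ≤ count.getD d2 0) (nn3 : 0 ≤ count.getD d3 0) :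
    pvA_removeTwo count 0 [d1, d2, d3] =
      if 2 ≤ count.getD d1 0 then (true, count.set d1 (count.getD d1 0 - 2))
      else if 1 ≤ count.getD d1 0 ∧ 1 ≤ count.getD d2 0 then
        (true, (count.set d1 0).set d2 (count.getD d2 0 - 1))
      else if 1 ≤ count.getD d1 0 ∧ 1 ≤ count.getD d3 0 then
        (true, (count.set d1 0).set d3 (count.getD d3 0 - 1))
      else if 2 ≤ count.getD d2 0 then (true, (count.set d1 0).set d2 (count.getD d2 0 - 2))
      else if 1 ≤ count.getD d2 0 ∧ 1 ≤ count.getD d3 0 then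
        (true, ((count.set d1 0).set d2 0).set d3 (count.getD d3 0 - 1))
      else if 2 ≤ count.getD d3 0 then (true, ((count.set d1 0).set d2 0).set d3 (count.getD d3 0 - 2))
      else (false, ((count.set d1 0).set d2 0).set d3 0) := by
  have e2 : (count.set d1 0).getD d2 0 = count.getD d2 0 := getD_set_ne _ _ _ _ h12
  have e3 : ((count.set d1 0).set d2 0).getD d3 0 = count.getD d3 0 := by
    rw [getD_set_ne _ _ _ _ h23, getD_set_ne _ _ _ _ h13]
  have e3' : (count.set d1 0).getD d3 0 = count.getD d3 0 := getD_set_ne _ _ _ _ h13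
  have l2 : d2 < (count.set d1 0).length := by simpa using hl2
  have l3 : d3 < ((count.set d1 0).set d2 0).length := by simpa using hl3
  have l3' : d3 < (count.set d1 0).length := by simpa using hl3
  rw [remTwo_cons, while_spec0 _ _ hl1 nn1]
  by_cases c1 : 2 ≤ count.getD d1 0
  · rw [if_pos c1, if_pos c1]
    rfl
  · rw [if_neg c1]
    dsimp only
    by_cases c2 : count.getD d1 0 = 1
    · rw [c2]
      rw [if_neg (show ¬((2:Int) ≤ 1) by norm_num)]
      rw [if_neg (show ¬(1:Int) = 2 by norm_num)]
      rw [remTwo_cons, while_spec1 _ _ (by rw [e2]; exact nn2), e2]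
      by_cases b2 : 1 ≤ count.getD d2 0
      · rw [if_pos b2, if_pos (show (1:Int) ≤ 1 ∧ 1 ≤ count.getD d2 0 from ⟨le_refl _, b2⟩)]
        rfl
      · rw [if_neg b2]
        dsimp only
        rw [if_neg (show ¬(1:Int) = 2 by norm_num)]
        rw [remTwo_cons, while_spec1 _ _ (by rw [e3']; exact nn3), e3']
        by_cases b3 : 1 ≤ count.getD d3 0
        · rw [if_pos b3,
              if_neg (show ¬((1:Int) ≤ 1 ∧ 1 ≤ count.getD d2 0) by omega),
              if_pos (show (1:Int) ≤ 1 ∧ 1 ≤ count.getD d3 0 from ⟨le_refl _, b3⟩)]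
          rfl
        · rw [if_neg b3]
          dsimp only
          rw [if_neg (show ¬(1:Int) = 2 by norm_num), remTwo_nil]
          rw [if_neg (show ¬((1:Int) ≤ 1 ∧ 1 ≤ count.getD d2 0) by omega),
              if_neg (show ¬((1:Int) ≤ 1 ∧ 1 ≤ count.getD d3 0) by omega),
              if_neg (show ¬(2 ≤ count.getD d2 0) by omega),
              if_neg (show ¬(1 ≤ count.getD d2 0 ∧ 1 ≤ count.getD d3 0) by omega),
              if_neg (show ¬(2 ≤ count.getD d3 0) by omega)]
          have s2 : (count.set d1 0).set d2 0 = count.set d1 0 :=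
            set_zero_noop _ _ l2 (by omega)
          have s3 : (count.set d1 0).set d3 0 = count.set d1 0 :=
            set_zero_noop _ _ l3' (by omega)
          rw [s2, s3]
    · have c0 : count.getD d1 0 = 0 := by omega
      rw [c0]
      rw [if_neg (show ¬((2:Int) ≤ 0) by norm_num)]
      rw [if_neg (show ¬(0:Int) = 2 by norm_num)]
      rw [remTwo_cons, while_spec0 _ _ l2 (by rw [e2]; exact nn2), e2]
      by_cases b2 : 2 ≤ count.getD d2 0
      · rw [if_pos b2,
            if_neg (show ¬((1:Int) ≤ 0 ∧ 1 ≤ count.getD d2 0) by omega),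
            if_neg (show ¬((1:Int) ≤ 0 ∧ 1 ≤ count.getD d3 0) by omega),
            if_pos b2]
        rfl
      · rw [if_neg b2]
        dsimp only
        by_cases m2 : count.getD d2 0 = 1
        · rw [m2]
          rw [if_neg (show ¬(1:Int) = 2 by norm_num)]
          rw [remTwo_cons, while_spec1 _ _ (by rw [e3]; exact nn3), e3]
          by_cases b3 : 1 ≤ count.getD d3 0
          · rw [if_pos b3,
                if_neg (show ¬((1:Int) ≤ 0 ∧ (1:Int) ≤ 1) by omega),
                if_neg (show ¬((1:Int) ≤ 0 ∧ 1 ≤ count.getD d3 0) by omega),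
                if_neg (show ¬((2:Int) ≤ 1) by omega),
                if_pos (show (1:Int) ≤ 1 ∧ 1 ≤ count.getD d3 0 from ⟨le_refl _, b3⟩)]
            rfl
          · rw [if_neg b3]
            dsimp only
            rw [if_neg (show ¬(1:Int) = 2 by norm_num), remTwo_nil]
            rw [if_neg (show ¬((1:Int) ≤ 0 ∧ (1:Int) ≤ 1) by omega),
                if_neg (show ¬((1:Int) ≤ 0 ∧ 1 ≤ count.getD d3 0) by omega),
                if_neg (show ¬((2:Int) ≤ 1) by omega),
                if_neg (show ¬((1:Int) ≤ 1 ∧ 1 ≤ count.getD d3 0) by omega),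
                if_neg (show ¬(2 ≤ count.getD d3 0) by omega)]
            have s3 : ((count.set d1 0).set d2 0).set d3 0 = (count.set d1 0).set d2 0 :=
              set_zero_noop _ _ l3 (by omega)
            rw [s3]
        · have z2 : count.getD d2 0 = 0 := by omega
          rw [z2]
          rw [if_neg (show ¬(0:Int) = 2 by norm_num)]
          rw [remTwo_cons, while_spec0 _ _ l3 (by rw [e3]; exact nn3), e3]
          by_cases b3 : 2 ≤ count.getD d3 0
          · rw [if_pos b3,
                if_neg (show ¬((1:Int) ≤ 0 ∧ (1:Int) ≤ 0) by omega),
                if_neg (show ¬((1:Int) ≤ 0 ∧ 1 ≤ count.getD d3 0) by omega),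
                if_neg (show ¬((2:Int) ≤ 0) by omega),
                if_neg (show ¬((1:Int) ≤ 0 ∧ 1 ≤ count.getD d3 0) by omega),
                if_pos b3]
            rfl
          · rw [if_neg b3]
            dsimp only
            rw [if_neg (show ¬ count.getD d3 0 = 2 by omega), remTwo_nil]
            rw [if_neg (show ¬((1:Int) ≤ 0 ∧ (1:Int) ≤ 0) by omega),
                if_neg (show ¬((1:Int) ≤ 0 ∧ 1 ≤ count.getD d3 0) by omega),
                if_neg (show ¬((2:Int) ≤ 0) by omega),
                if_neg (show ¬((1:Int) ≤ 0 ∧ 1 ≤ count.getD d3 0) by omega),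
                if_neg (show ¬(2 ≤ count.getD d3 0) by omega)]

def tailA (c : List Int) : String :=
  let result : List Char :=
    PySem.Chars.join [] ((PySem.List.pyRange 9 (-1) (-1)).map
      (fun i => PySem.List.pyRepeat (PySem.Int.toChars i) (c.getD i.toNat 0)))
  if result = [] then "-1"
  else if PySem.List.pyGet? result 0 = some '0' then "0"
  else String.ofList result

def tailB (kept : List Int) : String :=
  let res : List Char := PySem.Chars.join [] (kept.reverse.map PySem.Int.toChars)
  if res = [] then "-1"
  else if PySem.List.pyGet? res 0 = some '0' then "0"
  else String.ofList res

def coreA (digit : List Int) : String :=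
  let remainder := PySem.Int.mod digit.sum 3
  let count : List Int := (List.range 10).map (fun i => ((PySem.List.count digit (i : Int) : Nat) : Int))
  let count? : Option (List Int) :=
    if remainder = 1 then
      let r1 := pvA_removeOne count [1, 4, 7]
      if r1.1 then some r1.2
      else
        let r2 := pvA_removeTwo r1.2 0 [2, 5, 8]
        if r2.1 then some r2.2 else none
    else if remainder = 2 then
      let r1 := pvA_removeOne count [2, 5, 8]
      if r1.1 then some r1.2
      else
        let r2 := pvA_removeTwo r1.2 0 [1, 4, 7]
        if r2.1 then some r2.2 else none
    else some count
  match count? with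
  | none => "-1"
  | some c => tailA c

def coreB (l : List Int) : String :=
  let digits : List Int := PySem.List.sorted l (fun x => x) false
  let r := PySem.Int.mod digits.sum 3
  let kept? : Option (List Int) :=
    if r = 0 then some digits
    else
      match pvB_dropFirst digits r with
      | some k => some k
      | none =>
        match pvB_dropFirst digits (3 - r) with
        | some two => pvB_dropFirst two (3 - r)
        | none => none
  match kept? with
  | none => "-1"
  | some kept => tailB kept

theorem portA_core (s : String) :
    multiple_of_three s = coreA (s.toList.map (fun c => (PySem.Int.ofChars? [c]).getD 0)) := rfl

theorem portB_core (s : String) :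
    multiple_of_three_alt s = coreB (s.toList.map (fun c => (PySem.Int.ofChars? [c]).getD 0)) := rfl

theorem tails_eq (m0 m1 m2 m3 m4 m5 m6 m7 m8 m9 : Nat) :
    tailA [(m0 : Int), m1, m2, m3, m4, m5, m6, m7, m8, m9] =
      tailB (flatD m0 m1 m2 m3 m4 m5 m6 m7 m8 m9) := by
  unfold tailA tailB
  rw [render_eq]

theorem fail1_eq (n0 n2 n3 n5 n6 n8 n9 : Nat) :
    (match (let r2 := pvA_removeTwo [((n0:Nat):Int), 0, ((n2:Nat):Int), ((n3:Nat):Int), 0, ((n5:Nat):Int), ((n6:Nat):Int), 0, ((n8:Nat):Int), ((n9:Nat):Int)] 0 [2, 5, 8]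
            if r2.1 then some r2.2 else none) with
     | none => "-1"
     | some c => tailA c) =
    (match (match pvB_dropFirst (flatD n0 0 n2 n3 0 n5 n6 0 n8 n9) 2 with
            | some two => pvB_dropFirst two 2
            | none => none) with
     | none => "-1"
     | some kept => tailB kept) := by
  dsimp only
  rw [remTwo_spec _ 2 5 8 (by norm_num) (by norm_num) (by norm_num)
      (by norm_num) (by norm_num) (by norm_num)
      (by exact Int.natCast_nonneg n2) (by exact Int.natCast_nonneg n5) (by exact Int.natCast_nonneg n8)]
  rw [show ([((n0:Nat):Int), 0, ((n2:Nat):Int), ((n3:Nat):Int), 0, ((n5:Nat):Int), ((n6:Nat):Int), 0, ((n8:Nat):Int), ((n9:Nat):Int)] : List Int).getD 2 0 = ((n2:Nat):Int) from rfl,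
      show ([((n0:Nat):Int), 0, ((n2:Nat):Int), ((n3:Nat):Int), 0, ((n5:Nat):Int), ((n6:Nat):Int), 0, ((n8:Nat):Int), ((n9:Nat):Int)] : List Int).getD 5 0 = ((n5:Nat):Int) from rfl,
      show ([((n0:Nat):Int), 0, ((n2:Nat):Int), ((n3:Nat):Int), 0, ((n5:Nat):Int), ((n6:Nat):Int), 0, ((n8:Nat):Int), ((n9:Nat):Int)] : List Int).getD 8 0 = ((n8:Nat):Int) from rfl]
  rw [dropFlat2]
  by_cases h2 : 2 ≤ n2
  · rw [if_pos (show (2:Int) ≤ ((n2:Nat):Int) by omega), if_pos rfl, if_pos (show 0 < n2 by omega)]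
    dsimp only
    rw [dropFlat2, if_pos (show 0 < n2 - 1 by omega)]
    dsimp only
    rw [show (([((n0:Nat):Int), 0, ((n2:Nat):Int), ((n3:Nat):Int), 0, ((n5:Nat):Int), ((n6:Nat):Int), 0, ((n8:Nat):Int), ((n9:Nat):Int)] : List Int).set 2 (((n2:Nat):Int) - 2)) =
        [((n0:Nat):Int), 0, ((n2:Nat):Int) - 2, ((n3:Nat):Int), 0, ((n5:Nat):Int), ((n6:Nat):Int), 0,
          ((n8:Nat):Int), ((n9:Nat):Int)] from rfl,
        show ((n2:Nat):Int) - 2 = (((n2 - 1 - 1 : Nat)):Int) by omega]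
    exact tails_eq n0 0 (n2-1-1) n3 0 n5 n6 0 n8 n9
  · rw [if_neg (show ¬((2:Int) ≤ ((n2:Nat):Int)) by omega)]
    by_cases h21 : 1 ≤ n2
    · -- n2 = 1
      rw [if_pos (show 0 < n2 by omega)]
      dsimp only
      rw [dropFlat2, if_neg (show ¬(0 < n2 - 1) by omega)]
      by_cases h51 : 1 ≤ n5
      · rw [if_pos (show (1:Int) ≤ ((n2:Nat):Int) ∧ (1:Int) ≤ ((n5:Nat):Int) from ⟨by omega, by omega⟩),
            if_pos rfl, if_pos (show 0 < n5 by omega)]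
        dsimp only
        rw [show ((([((n0:Nat):Int), 0, ((n2:Nat):Int), ((n3:Nat):Int), 0, ((n5:Nat):Int), ((n6:Nat):Int), 0, ((n8:Nat):Int), ((n9:Nat):Int)] : List Int).set 2 0).set 5 (((n5:Nat):Int) - 1)) =
            [((n0:Nat):Int), 0, 0, ((n3:Nat):Int), 0, ((n5:Nat):Int) - 1, ((n6:Nat):Int), 0,
              ((n8:Nat):Int), ((n9:Nat):Int)] from rfl,
            show ((n5:Nat):Int) - 1 = (((n5 - 1 : Nat)):Int) by omega,
            show n2 - 1 = 0 from by omega]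
        exact tails_eq n0 0 0 n3 0 (n5-1) n6 0 n8 n9
      · rw [if_neg (show ¬((1:Int) ≤ ((n2:Nat):Int) ∧ (1:Int) ≤ ((n5:Nat):Int)) from fun h => by omega),
            if_neg (show ¬(0 < n5) by omega)]
        by_cases h81 : 1 ≤ n8
        · rw [if_pos (show (1:Int) ≤ ((n2:Nat):Int) ∧ (1:Int) ≤ ((n8:Nat):Int) from ⟨by omega, by omega⟩),
              if_pos rfl, if_pos (show 0 < n8 by omega)]
          dsimp only
          rw [show ((([((n0:Nat):Int), 0, ((n2:Nat):Int), ((n3:Nat):Int), 0, ((n5:Nat):Int), ((n6:Nat):Int), 0, ((n8:Nat):Int), ((n9:Nat):Int)] : List Int).set 2 0).set 8 (((n8:Nat):Int) - 1)) =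
              [((n0:Nat):Int), 0, 0, ((n3:Nat):Int), 0, ((n5:Nat):Int), ((n6:Nat):Int), 0,
                ((n8:Nat):Int) - 1, ((n9:Nat):Int)] from rfl,
              show ((n8:Nat):Int) - 1 = (((n8 - 1 : Nat)):Int) by omega,
              show n2 - 1 = 0 from by omega]
          exact tails_eq n0 0 0 n3 0 n5 n6 0 (n8-1) n9
        · rw [if_neg (show ¬((1:Int) ≤ ((n2:Nat):Int) ∧ (1:Int) ≤ ((n8:Nat):Int)) from fun h => by omega),
              if_neg (show ¬((2:Int) ≤ ((n5:Nat):Int)) by omega),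
              if_neg (show ¬((1:Int) ≤ ((n5:Nat):Int) ∧ (1:Int) ≤ ((n8:Nat):Int)) from fun h => by omega),
              if_neg (show ¬((2:Int) ≤ ((n8:Nat):Int)) by omega),
              if_neg (show ¬(false = true) from by simp),
              if_neg (show ¬(0 < n8) by omega)]
    · -- n2 = 0
      rw [if_neg (show ¬(0 < n2) by omega)]
      by_cases h52 : 2 ≤ n5
      · rw [if_neg (show ¬((1:Int) ≤ ((n2:Nat):Int) ∧ (1:Int) ≤ ((n5:Nat):Int)) from fun h => by omega),
            if_neg (show ¬((1:Int) ≤ ((n2:Nat):Int) ∧ (1:Int) ≤ ((n8:Nat):Int)) from fun h => by omega),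
            if_pos (show (2:Int) ≤ ((n5:Nat):Int) by omega),
            if_pos rfl, if_pos (show 0 < n5 by omega)]
        dsimp only
        rw [dropFlat2, if_neg (show ¬(0 < n2) by omega), if_pos (show 0 < n5 - 1 by omega)]
        dsimp only
        rw [show ((([((n0:Nat):Int), 0, ((n2:Nat):Int), ((n3:Nat):Int), 0, ((n5:Nat):Int), ((n6:Nat):Int), 0, ((n8:Nat):Int), ((n9:Nat):Int)] : List Int).set 2 0).set 5 (((n5:Nat):Int) - 2)) =
            [((n0:Nat):Int), 0, 0, ((n3:Nat):Int), 0, ((n5:Nat):Int) - 2, ((n6:Nat):Int), 0,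
              ((n8:Nat):Int), ((n9:Nat):Int)] from rfl,
            show ((n5:Nat):Int) - 2 = (((n5 - 1 - 1 : Nat)):Int) by omega,
            show n2 = 0 from by omega]
        exact tails_eq n0 0 0 n3 0 (n5-1-1) n6 0 n8 n9
      · by_cases h55 : 1 ≤ n5
        · -- n5 = 1
          rw [if_neg (show ¬((1:Int) ≤ ((n2:Nat):Int) ∧ (1:Int) ≤ ((n5:Nat):Int)) from fun h => by omega),
              if_neg (show ¬((1:Int) ≤ ((n2:Nat):Int) ∧ (1:Int) ≤ ((n8:Nat):Int)) from fun h => by omega),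
              if_neg (show ¬((2:Int) ≤ ((n5:Nat):Int)) by omega),
              if_pos (show 0 < n5 by omega)]
          dsimp only
          rw [dropFlat2, if_neg (show ¬(0 < n2) by omega), if_neg (show ¬(0 < n5 - 1) by omega)]
          by_cases h81 : 1 ≤ n8
          · rw [if_pos (show (1:Int) ≤ ((n5:Nat):Int) ∧ (1:Int) ≤ ((n8:Nat):Int) from ⟨by omega, by omega⟩),
                if_pos rfl, if_pos (show 0 < n8 by omega)]
            dsimp only
            rw [show (((([((n0:Nat):Int), 0, ((n2:Nat):Int), ((n3:Nat):Int), 0, ((n5:Nat):Int), ((n6:Nat):Int), 0, ((n8:Nat):Int), ((n9:Nat):Int)] : List Int).set 2 0).set 5 0).set 8 (((n8:Nat):Int) - 1)) =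
                [((n0:Nat):Int), 0, 0, ((n3:Nat):Int), 0, 0, ((n6:Nat):Int), 0,
                  ((n8:Nat):Int) - 1, ((n9:Nat):Int)] from rfl,
                show ((n8:Nat):Int) - 1 = (((n8 - 1 : Nat)):Int) by omega,
                show n2 = 0 from by omega, show n5 - 1 = 0 from by omega]
            exact tails_eq n0 0 0 n3 0 0 n6 0 (n8-1) n9
          · rw [if_neg (show ¬((1:Int) ≤ ((n5:Nat):Int) ∧ (1:Int) ≤ ((n8:Nat):Int)) from fun h => by omega),
                if_neg (show ¬((2:Int) ≤ ((n8:Nat):Int)) by omega),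
                if_neg (show ¬(false = true) from by simp),
                if_neg (show ¬(0 < n8) by omega)]
        · -- n5 = 0
          rw [if_neg (show ¬((1:Int) ≤ ((n2:Nat):Int) ∧ (1:Int) ≤ ((n5:Nat):Int)) from fun h => by omega),
              if_neg (show ¬((1:Int) ≤ ((n2:Nat):Int) ∧ (1:Int) ≤ ((n8:Nat):Int)) from fun h => by omega),
              if_neg (show ¬((2:Int) ≤ ((n5:Nat):Int)) by omega),
              if_neg (show ¬((1:Int) ≤ ((n5:Nat):Int) ∧ (1:Int) ≤ ((n8:Nat):Int)) from fun h => by omega),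
              if_neg (show ¬(0 < n5) by omega)]
          by_cases h82 : 2 ≤ n8
          · rw [if_pos (show (2:Int) ≤ ((n8:Nat):Int) by omega),
                if_pos rfl, if_pos (show 0 < n8 by omega)]
            dsimp only
            rw [dropFlat2, if_neg (show ¬(0 < n2) by omega), if_neg (show ¬(0 < n5) by omega),
                if_pos (show 0 < n8 - 1 by omega)]
            dsimp only
            rw [show (((([((n0:Nat):Int), 0, ((n2:Nat):Int), ((n3:Nat):Int), 0, ((n5:Nat):Int), ((n6:Nat):Int), 0, ((n8:Nat):Int), ((n9:Nat):Int)] : List Int).set 2 0).set 5 0).set 8 (((n8:Nat):Int) - 2)) =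
                [((n0:Nat):Int), 0, 0, ((n3:Nat):Int), 0, 0, ((n6:Nat):Int), 0,
                  ((n8:Nat):Int) - 2, ((n9:Nat):Int)] from rfl,
                show ((n8:Nat):Int) - 2 = (((n8 - 1 - 1 : Nat)):Int) by omega,
                show n2 = 0 from by omega, show n5 = 0 from by omega]
            exact tails_eq n0 0 0 n3 0 0 n6 0 (n8-1-1) n9
          · by_cases h88 : 1 ≤ n8
            · rw [if_neg (show ¬((2:Int) ≤ ((n8:Nat):Int)) by omega),
                  if_neg (show ¬(false = true) from by simp),
                  if_pos (show 0 < n8 by omega)]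
              dsimp only
              rw [dropFlat2, if_neg (show ¬(0 < n2) by omega), if_neg (show ¬(0 < n5) by omega),
                  if_neg (show ¬(0 < n8 - 1) by omega)]
            · rw [if_neg (show ¬((2:Int) ≤ ((n8:Nat):Int)) by omega),
                  if_neg (show ¬(false = true) from by simp),
                  if_neg (show ¬(0 < n8) by omega)]

theorem fail2_eq (n0 m1 n3 m4 n6 m7 n9 : Nat) :
    (match (let r2 := pvA_removeTwo [((n0:Nat):Int), ((m1:Nat):Int), 0, ((n3:Nat):Int), ((m4:Nat):Int), 0, ((n6:Nat):Int), ((m7:Nat):Int), 0, ((n9:Nat):Int)] 0 [1, 4, 7]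
            if r2.1 then some r2.2 else none) with
     | none => "-1"
     | some c => tailA c) =
    (match (match pvB_dropFirst (flatD n0 m1 0 n3 m4 0 n6 m7 0 n9) 1 with
            | some two => pvB_dropFirst two 1
            | none => none) with
     | none => "-1"
     | some kept => tailB kept) := by
  dsimp only
  rw [remTwo_spec _ 1 4 7 (by norm_num) (by norm_num) (by norm_num)
      (by norm_num) (by norm_num) (by norm_num)
      (by exact Int.natCast_nonneg m1) (by exact Int.natCast_nonneg m4) (by exact Int.natCast_nonneg m7)]
  rw [show ([((n0:Nat):Int), ((m1:Nat):Int), 0, ((n3:Nat):Int), ((m4:Nat):Int), 0, ((n6:Nat):Int), ((m7:Nat):Int), 0, ((n9:Nat):Int)] : List Int).getD 1 0 = ((m1:Nat):Int) from rfl,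
      show ([((n0:Nat):Int), ((m1:Nat):Int), 0, ((n3:Nat):Int), ((m4:Nat):Int), 0, ((n6:Nat):Int), ((m7:Nat):Int), 0, ((n9:Nat):Int)] : List Int).getD 4 0 = ((m4:Nat):Int) from rfl,
      show ([((n0:Nat):Int), ((m1:Nat):Int), 0, ((n3:Nat):Int), ((m4:Nat):Int), 0, ((n6:Nat):Int), ((m7:Nat):Int), 0, ((n9:Nat):Int)] : List Int).getD 7 0 = ((m7:Nat):Int) from rfl]
  rw [dropFlat1]
  by_cases h2 : 2 ≤ m1
  · rw [if_pos (show (2:Int) ≤ ((m1:Nat):Int) by omega), if_pos rfl, if_pos (show 0 < m1 by omega)]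
    dsimp only
    rw [dropFlat1, if_pos (show 0 < m1 - 1 by omega)]
    dsimp only
    rw [show (([((n0:Nat):Int), ((m1:Nat):Int), 0, ((n3:Nat):Int), ((m4:Nat):Int), 0, ((n6:Nat):Int), ((m7:Nat):Int), 0, ((n9:Nat):Int)] : List Int).set 1 (((m1:Nat):Int) - 2)) =
        [((n0:Nat):Int), ((m1:Nat):Int) - 2, 0, ((n3:Nat):Int), ((m4:Nat):Int), 0, ((n6:Nat):Int),
          ((m7:Nat):Int), 0, ((n9:Nat):Int)] from rfl,
        show ((m1:Nat):Int) - 2 = (((m1 - 1 - 1 : Nat)):Int) by omega]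
    exact tails_eq n0 (m1-1-1) 0 n3 m4 0 n6 m7 0 n9
  · rw [if_neg (show ¬((2:Int) ≤ ((m1:Nat):Int)) by omega)]
    by_cases h21 : 1 ≤ m1
    · -- m1 = 1
      rw [if_pos (show 0 < m1 by omega)]
      dsimp only
      rw [dropFlat1, if_neg (show ¬(0 < m1 - 1) by omega)]
      by_cases h51 : 1 ≤ m4
      · rw [if_pos (show (1:Int) ≤ ((m1:Nat):Int) ∧ (1:Int) ≤ ((m4:Nat):Int) from ⟨by omega, by omega⟩),
            if_pos rfl, if_pos (show 0 < m4 by omega)]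
        dsimp only
        rw [show ((([((n0:Nat):Int), ((m1:Nat):Int), 0, ((n3:Nat):Int), ((m4:Nat):Int), 0, ((n6:Nat):Int), ((m7:Nat):Int), 0, ((n9:Nat):Int)] : List Int).set 1 0).set 4 (((m4:Nat):Int) - 1)) =
            [((n0:Nat):Int), 0, 0, ((n3:Nat):Int), ((m4:Nat):Int) - 1, 0, ((n6:Nat):Int),
              ((m7:Nat):Int), 0, ((n9:Nat):Int)] from rfl,
            show ((m4:Nat):Int) - 1 = (((m4 - 1 : Nat)):Int) by omega,
            show m1 - 1 = 0 from by omega]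
        exact tails_eq n0 0 0 n3 (m4-1) 0 n6 m7 0 n9
      · rw [if_neg (show ¬((1:Int) ≤ ((m1:Nat):Int) ∧ (1:Int) ≤ ((m4:Nat):Int)) from fun h => by omega),
            if_neg (show ¬(0 < m4) by omega)]
        by_cases h81 : 1 ≤ m7
        · rw [if_pos (show (1:Int) ≤ ((m1:Nat):Int) ∧ (1:Int) ≤ ((m7:Nat):Int) from ⟨by omega, by omega⟩),
              if_pos rfl, if_pos (show 0 < m7 by omega)]
          dsimp only
          rw [show ((([((n0:Nat):Int), ((m1:Nat):Int), 0, ((n3:Nat):Int), ((m4:Nat):Int), 0, ((n6:Nat):Int), ((m7:Nat):Int), 0, ((n9:Nat):Int)] : List Int).set 1 0).set 7 (((m7:Nat):Int) - 1)) =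
              [((n0:Nat):Int), 0, 0, ((n3:Nat):Int), ((m4:Nat):Int), 0, ((n6:Nat):Int),
                ((m7:Nat):Int) - 1, 0, ((n9:Nat):Int)] from rfl,
              show ((m7:Nat):Int) - 1 = (((m7 - 1 : Nat)):Int) by omega,
              show m1 - 1 = 0 from by omega]
          exact tails_eq n0 0 0 n3 m4 0 n6 (m7-1) 0 n9
        · rw [if_neg (show ¬((1:Int) ≤ ((m1:Nat):Int) ∧ (1:Int) ≤ ((m7:Nat):Int)) from fun h => by omega),
              if_neg (show ¬((2:Int) ≤ ((m4:Nat):Int)) by omega),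
              if_neg (show ¬((1:Int) ≤ ((m4:Nat):Int) ∧ (1:Int) ≤ ((m7:Nat):Int)) from fun h => by omega),
              if_neg (show ¬((2:Int) ≤ ((m7:Nat):Int)) by omega),
              if_neg (show ¬(false = true) from by simp),
              if_neg (show ¬(0 < m7) by omega)]
    · -- m1 = 0
      rw [if_neg (show ¬(0 < m1) by omega)]
      by_cases h52 : 2 ≤ m4
      · rw [if_neg (show ¬((1:Int) ≤ ((m1:Nat):Int) ∧ (1:Int) ≤ ((m4:Nat):Int)) from fun h => by omega),
            if_neg (show ¬((1:Int) ≤ ((m1:Nat):Int) ∧ (1:Int) ≤ ((m7:Nat):Int)) from fun h => by omega),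
            if_pos (show (2:Int) ≤ ((m4:Nat):Int) by omega),
            if_pos rfl, if_pos (show 0 < m4 by omega)]
        dsimp only
        rw [dropFlat1, if_neg (show ¬(0 < m1) by omega), if_pos (show 0 < m4 - 1 by omega)]
        dsimp only
        rw [show ((([((n0:Nat):Int), ((m1:Nat):Int), 0, ((n3:Nat):Int), ((m4:Nat):Int), 0, ((n6:Nat):Int), ((m7:Nat):Int), 0, ((n9:Nat):Int)] : List Int).set 1 0).set 4 (((m4:Nat):Int) - 2)) =
            [((n0:Nat):Int), 0, 0, ((n3:Nat):Int), ((m4:Nat):Int) - 2, 0, ((n6:Nat):Int),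
              ((m7:Nat):Int), 0, ((n9:Nat):Int)] from rfl,
            show ((m4:Nat):Int) - 2 = (((m4 - 1 - 1 : Nat)):Int) by omega,
            show m1 = 0 from by omega]
        exact tails_eq n0 0 0 n3 (m4-1-1) 0 n6 m7 0 n9
      · by_cases h55 : 1 ≤ m4
        · -- m4 = 1
          rw [if_neg (show ¬((1:Int) ≤ ((m1:Nat):Int) ∧ (1:Int) ≤ ((m4:Nat):Int)) from fun h => by omega),
              if_neg (show ¬((1:Int) ≤ ((m1:Nat):Int) ∧ (1:Int) ≤ ((m7:Nat):Int)) from fun h => by omega),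
              if_neg (show ¬((2:Int) ≤ ((m4:Nat):Int)) by omega),
              if_pos (show 0 < m4 by omega)]
          dsimp only
          rw [dropFlat1, if_neg (show ¬(0 < m1) by omega), if_neg (show ¬(0 < m4 - 1) by omega)]
          by_cases h81 : 1 ≤ m7
          · rw [if_pos (show (1:Int) ≤ ((m4:Nat):Int) ∧ (1:Int) ≤ ((m7:Nat):Int) from ⟨by omega, by omega⟩),
                if_pos rfl, if_pos (show 0 < m7 by omega)]
            dsimp only
            rw [show (((([((n0:Nat):Int), ((m1:Nat):Int), 0, ((n3:Nat):Int), ((m4:Nat):Int), 0, ((n6:Nat):Int), ((m7:Nat):Int), 0, ((n9:Nat):Int)] : List Int).set 1 0).set 4 0).set 7 (((m7:Nat):Int) - 1)) =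
                [((n0:Nat):Int), 0, 0, ((n3:Nat):Int), 0, 0, ((n6:Nat):Int),
                  ((m7:Nat):Int) - 1, 0, ((n9:Nat):Int)] from rfl,
                show ((m7:Nat):Int) - 1 = (((m7 - 1 : Nat)):Int) by omega,
                show m1 = 0 from by omega, show m4 - 1 = 0 from by omega]
            exact tails_eq n0 0 0 n3 0 0 n6 (m7-1) 0 n9
          · rw [if_neg (show ¬((1:Int) ≤ ((m4:Nat):Int) ∧ (1:Int) ≤ ((m7:Nat):Int)) from fun h => by omega),
                if_neg (show ¬((2:Int) ≤ ((m7:Nat):Int)) by omega),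
                if_neg (show ¬(false = true) from by simp),
                if_neg (show ¬(0 < m7) by omega)]
        · -- m4 = 0
          rw [if_neg (show ¬((1:Int) ≤ ((m1:Nat):Int) ∧ (1:Int) ≤ ((m4:Nat):Int)) from fun h => by omega),
              if_neg (show ¬((1:Int) ≤ ((m1:Nat):Int) ∧ (1:Int) ≤ ((m7:Nat):Int)) from fun h => by omega),
              if_neg (show ¬((2:Int) ≤ ((m4:Nat):Int)) by omega),
              if_neg (show ¬((1:Int) ≤ ((m4:Nat):Int) ∧ (1:Int) ≤ ((m7:Nat):Int)) from fun h => by omega),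
              if_neg (show ¬(0 < m4) by omega)]
          by_cases h82 : 2 ≤ m7
          · rw [if_pos (show (2:Int) ≤ ((m7:Nat):Int) by omega),
                if_pos rfl, if_pos (show 0 < m7 by omega)]
            dsimp only
            rw [dropFlat1, if_neg (show ¬(0 < m1) by omega), if_neg (show ¬(0 < m4) by omega),
                if_pos (show 0 < m7 - 1 by omega)]
            dsimp only
            rw [show (((([((n0:Nat):Int), ((m1:Nat):Int), 0, ((n3:Nat):Int), ((m4:Nat):Int), 0, ((n6:Nat):Int), ((m7:Nat):Int), 0, ((n9:Nat):Int)] : List Int).set 1 0).set 4 0).set 7 (((m7:Nat):Int) - 2)) =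
                [((n0:Nat):Int), 0, 0, ((n3:Nat):Int), 0, 0, ((n6:Nat):Int),
                  ((m7:Nat):Int) - 2, 0, ((n9:Nat):Int)] from rfl,
                show ((m7:Nat):Int) - 2 = (((m7 - 1 - 1 : Nat)):Int) by omega,
                show m1 = 0 from by omega, show m4 = 0 from by omega]
            exact tails_eq n0 0 0 n3 0 0 n6 (m7-1-1) 0 n9
          · by_cases h88 : 1 ≤ m7
            · rw [if_neg (show ¬((2:Int) ≤ ((m7:Nat):Int)) by omega),
                  if_neg (show ¬(false = true) from by simp),
                  if_pos (show 0 < m7 by omega)]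
              dsimp only
              rw [dropFlat1, if_neg (show ¬(0 < m1) by omega), if_neg (show ¬(0 < m4) by omega),
                  if_neg (show ¬(0 < m7 - 1) by omega)]
            · rw [if_neg (show ¬((2:Int) ≤ ((m7:Nat):Int)) by omega),
                  if_neg (show ¬(false = true) from by simp),
                  if_neg (show ¬(0 < m7) by omega)]

theorem core_eq (ds : List Int) (hds : ∀ d ∈ ds, d ∈ ([0,1,2,3,4,5,6,7,8,9] : List Int)) :
    coreA ds = coreB ds := by
  simp only [coreA, coreB]
  rw [count_list, sorted_flat ds hds]
  rw [show (flatD (ds.count 0) (ds.count 1) (ds.count 2) (ds.count 3) (ds.count 4) (ds.count 5)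
        (ds.count 6) (ds.count 7) (ds.count 8) (ds.count 9)).sum = ds.sum from by
      rw [← sorted_flat ds hds]; exact List.Perm.sum_eq (PySem.List.sorted_perm ds (fun x => x) false)]
  generalize ds.count (0:Int) = n0
  generalize ds.count (1:Int) = n1
  generalize ds.count (2:Int) = n2
  generalize ds.count (3:Int) = n3
  generalize ds.count (4:Int) = n4
  generalize ds.count (5:Int) = n5
  generalize ds.count (6:Int) = n6
  generalize ds.count (7:Int) = n7
  generalize ds.count (8:Int) = n8
  generalize ds.count (9:Int) = n9
  have hr : PySem.Int.mod ds.sum 3 = 0 ∨ PySem.Int.mod ds.sum 3 = 1 ∨ PySem.Int.mod ds.sum 3 = 2 := by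
    have h1 : 0 ≤ PySem.Int.mod ds.sum 3 := PySem.Int.mod_nonneg ds.sum (by norm_num)
    have h2 : PySem.Int.mod ds.sum 3 < 3 := PySem.Int.mod_lt ds.sum (by norm_num)
    omega
  rcases hr with h|h|h <;> rw [h]
  · -- remainder 0
    rw [if_neg (show ¬(0:Int) = 1 from by norm_num), if_neg (show ¬(0:Int) = 2 from by norm_num),
        if_pos rfl]
    exact tails_eq n0 n1 n2 n3 n4 n5 n6 n7 n8 n9
  · -- remainder 1
    rw [if_pos rfl, if_neg (show ¬(1:Int) = 0 from by norm_num)]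
    rw [remOne_spec, dropFlat1,
        show ([((n0:Nat):Int), ((n1:Nat):Int), ((n2:Nat):Int), ((n3:Nat):Int), ((n4:Nat):Int), ((n5:Nat):Int), ((n6:Nat):Int), ((n7:Nat):Int), ((n8:Nat):Int), ((n9:Nat):Int)] : List Int).getD 1 0 = ((n1:Nat):Int) from rfl,
        show ([((n0:Nat):Int), ((n1:Nat):Int), ((n2:Nat):Int), ((n3:Nat):Int), ((n4:Nat):Int), ((n5:Nat):Int), ((n6:Nat):Int), ((n7:Nat):Int), ((n8:Nat):Int), ((n9:Nat):Int)] : List Int).getD 4 0 = ((n4:Nat):Int) from rfl,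
        show ([((n0:Nat):Int), ((n1:Nat):Int), ((n2:Nat):Int), ((n3:Nat):Int), ((n4:Nat):Int), ((n5:Nat):Int), ((n6:Nat):Int), ((n7:Nat):Int), ((n8:Nat):Int), ((n9:Nat):Int)] : List Int).getD 7 0 = ((n7:Nat):Int) from rfl]
    by_cases k1 : 1 ≤ n1
    · rw [if_pos (show ((n1:Nat):Int) > 0 by omega), if_pos rfl, if_pos (show 0 < n1 by omega)]
      dsimp only
      rw [show (([((n0:Nat):Int), ((n1:Nat):Int), ((n2:Nat):Int), ((n3:Nat):Int), ((n4:Nat):Int), ((n5:Nat):Int), ((n6:Nat):Int), ((n7:Nat):Int), ((n8:Nat):Int), ((n9:Nat):Int)] : List Int).set 1 (((n1:Nat):Int) - 1)) =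
          [((n0:Nat):Int), ((n1:Nat):Int) - 1, ((n2:Nat):Int), ((n3:Nat):Int), ((n4:Nat):Int),
            ((n5:Nat):Int), ((n6:Nat):Int), ((n7:Nat):Int), ((n8:Nat):Int), ((n9:Nat):Int)] from rfl,
          show ((n1:Nat):Int) - 1 = (((n1 - 1 : Nat)):Int) by omega]
      exact tails_eq n0 (n1-1) n2 n3 n4 n5 n6 n7 n8 n9
    · rw [if_neg (show ¬(((n1:Nat):Int) > 0) by omega), if_neg (show ¬(0 < n1) by omega)]
      by_cases k4 : 1 ≤ n4
      · rw [if_pos (show ((n4:Nat):Int) > 0 by omega), if_pos rfl, if_pos (show 0 < n4 by omega)]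
        dsimp only
        rw [show (([((n0:Nat):Int), ((n1:Nat):Int), ((n2:Nat):Int), ((n3:Nat):Int), ((n4:Nat):Int), ((n5:Nat):Int), ((n6:Nat):Int), ((n7:Nat):Int), ((n8:Nat):Int), ((n9:Nat):Int)] : List Int).set 4 (((n4:Nat):Int) - 1)) =
            [((n0:Nat):Int), ((n1:Nat):Int), ((n2:Nat):Int), ((n3:Nat):Int), ((n4:Nat):Int) - 1,
              ((n5:Nat):Int), ((n6:Nat):Int), ((n7:Nat):Int), ((n8:Nat):Int), ((n9:Nat):Int)] from rfl,
            show ((n4:Nat):Int) - 1 = (((n4 - 1 : Nat)):Int) by omega]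
        exact tails_eq n0 n1 n2 n3 (n4-1) n5 n6 n7 n8 n9
      · rw [if_neg (show ¬(((n4:Nat):Int) > 0) by omega), if_neg (show ¬(0 < n4) by omega)]
        by_cases k7 : 1 ≤ n7
        · rw [if_pos (show ((n7:Nat):Int) > 0 by omega), if_pos rfl, if_pos (show 0 < n7 by omega)]
          dsimp only
          rw [show (([((n0:Nat):Int), ((n1:Nat):Int), ((n2:Nat):Int), ((n3:Nat):Int), ((n4:Nat):Int), ((n5:Nat):Int), ((n6:Nat):Int), ((n7:Nat):Int), ((n8:Nat):Int), ((n9:Nat):Int)] : List Int).set 7 (((n7:Nat):Int) - 1)) =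
              [((n0:Nat):Int), ((n1:Nat):Int), ((n2:Nat):Int), ((n3:Nat):Int), ((n4:Nat):Int),
                ((n5:Nat):Int), ((n6:Nat):Int), ((n7:Nat):Int) - 1, ((n8:Nat):Int), ((n9:Nat):Int)] from rfl,
              show ((n7:Nat):Int) - 1 = (((n7 - 1 : Nat)):Int) by omega]
          exact tails_eq n0 n1 n2 n3 n4 n5 n6 (n7-1) n8 n9
        · rw [if_neg (show ¬(((n7:Nat):Int) > 0) by omega), if_neg (show ¬(0 < n7) by omega),
              if_neg (show ¬(false = true) from by simp)]
          dsimp only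
          rw [show (3:Int) - 1 = 2 from by norm_num,
              show n1 = 0 from by omega, show n4 = 0 from by omega, show n7 = 0 from by omega]
          exact fail1_eq n0 n2 n3 n5 n6 n8 n9
  · -- remainder 2
    rw [if_neg (show ¬(2:Int) = 1 from by norm_num), if_pos rfl,
        if_neg (show ¬(2:Int) = 0 from by norm_num)]
    rw [remOne_spec, dropFlat2,
        show ([((n0:Nat):Int), ((n1:Nat):Int), ((n2:Nat):Int), ((n3:Nat):Int), ((n4:Nat):Int), ((n5:Nat):Int), ((n6:Nat):Int), ((n7:Nat):Int), ((n8:Nat):Int), ((n9:Nat):Int)] : List Int).getD 2 0 = ((n2:Nat):Int) from rfl,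
        show ([((n0:Nat):Int), ((n1:Nat):Int), ((n2:Nat):Int), ((n3:Nat):Int), ((n4:Nat):Int), ((n5:Nat):Int), ((n6:Nat):Int), ((n7:Nat):Int), ((n8:Nat):Int), ((n9:Nat):Int)] : List Int).getD 5 0 = ((n5:Nat):Int) from rfl,
        show ([((n0:Nat):Int), ((n1:Nat):Int), ((n2:Nat):Int), ((n3:Nat):Int), ((n4:Nat):Int), ((n5:Nat):Int), ((n6:Nat):Int), ((n7:Nat):Int), ((n8:Nat):Int), ((n9:Nat):Int)] : List Int).getD 8 0 = ((n8:Nat):Int) from rfl]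
    by_cases k2 : 1 ≤ n2
    · rw [if_pos (show ((n2:Nat):Int) > 0 by omega), if_pos rfl, if_pos (show 0 < n2 by omega)]
      dsimp only
      rw [show (([((n0:Nat):Int), ((n1:Nat):Int), ((n2:Nat):Int), ((n3:Nat):Int), ((n4:Nat):Int), ((n5:Nat):Int), ((n6:Nat):Int), ((n7:Nat):Int), ((n8:Nat):Int), ((n9:Nat):Int)] : List Int).set 2 (((n2:Nat):Int) - 1)) =
          [((n0:Nat):Int), ((n1:Nat):Int), ((n2:Nat):Int) - 1, ((n3:Nat):Int), ((n4:Nat):Int),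
            ((n5:Nat):Int), ((n6:Nat):Int), ((n7:Nat):Int), ((n8:Nat):Int), ((n9:Nat):Int)] from rfl,
          show ((n2:Nat):Int) - 1 = (((n2 - 1 : Nat)):Int) by omega]
      exact tails_eq n0 n1 (n2-1) n3 n4 n5 n6 n7 n8 n9
    · rw [if_neg (show ¬(((n2:Nat):Int) > 0) by omega), if_neg (show ¬(0 < n2) by omega)]
      by_cases k5 : 1 ≤ n5
      · rw [if_pos (show ((n5:Nat):Int) > 0 by omega), if_pos rfl, if_pos (show 0 < n5 by omega)]
        dsimp only
        rw [show (([((n0:Nat):Int), ((n1:Nat):Int), ((n2:Nat):Int), ((n3:Nat):Int), ((n4:Nat):Int), ((n5:Nat):Int), ((n6:Nat):Int), ((n7:Nat):Int), ((n8:Nat):Int), ((n9:Nat):Int)] : List Int).set 5 (((n5:Nat):Int) - 1)) =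
            [((n0:Nat):Int), ((n1:Nat):Int), ((n2:Nat):Int), ((n3:Nat):Int), ((n4:Nat):Int),
              ((n5:Nat):Int) - 1, ((n6:Nat):Int), ((n7:Nat):Int), ((n8:Nat):Int), ((n9:Nat):Int)] from rfl,
            show ((n5:Nat):Int) - 1 = (((n5 - 1 : Nat)):Int) by omega]
        exact tails_eq n0 n1 n2 n3 n4 (n5-1) n6 n7 n8 n9
      · rw [if_neg (show ¬(((n5:Nat):Int) > 0) by omega), if_neg (show ¬(0 < n5) by omega)]
        by_cases k8 : 1 ≤ n8
        · rw [if_pos (show ((n8:Nat):Int) > 0 by omega), if_pos rfl, if_pos (show 0 < n8 by omega)]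
          dsimp only
          rw [show (([((n0:Nat):Int), ((n1:Nat):Int), ((n2:Nat):Int), ((n3:Nat):Int), ((n4:Nat):Int), ((n5:Nat):Int), ((n6:Nat):Int), ((n7:Nat):Int), ((n8:Nat):Int), ((n9:Nat):Int)] : List Int).set 8 (((n8:Nat):Int) - 1)) =
              [((n0:Nat):Int), ((n1:Nat):Int), ((n2:Nat):Int), ((n3:Nat):Int), ((n4:Nat):Int),
                ((n5:Nat):Int), ((n6:Nat):Int), ((n7:Nat):Int), ((n8:Nat):Int) - 1, ((n9:Nat):Int)] from rfl,
              show ((n8:Nat):Int) - 1 = (((n8 - 1 : Nat)):Int) by omega]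
          exact tails_eq n0 n1 n2 n3 n4 n5 n6 n7 (n8-1) n9
        · rw [if_neg (show ¬(((n8:Nat):Int) > 0) by omega), if_neg (show ¬(0 < n8) by omega),
              if_neg (show ¬(false = true) from by simp)]
          dsimp only
          rw [show (3:Int) - 2 = 1 from by norm_num,
              show n2 = 0 from by omega, show n5 = 0 from by omega, show n8 = 0 from by omega]
          exact fail2_eq n0 n1 n3 n4 n6 n7 n9

-- ===== VERDICT (by name: the statement is the Claim_ definition above) =====
theorem multiple_of_three_spec : Claim_equal_multiple_of_three := by
  intro s _ hpre
  unfold Spec_multiple_of_three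
  rw [portA_core, portB_core]
  exact core_eq _ (mem_digits s hpre)
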